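-- pv_equiv track=rewrite | github.com/CryAndRRich/hustack | leetcode/binary_search/3323_Minimize_Connected_Groups_by_Inserting_Interval/codes/bs.py | minConnectedGroups
-- ===== SOURCE A (Python) =====
-- from typing import List
--
-- def minConnectedGroups(intervals: List[List[int]], k: int) -> int:
--     intervals.sort()
--     merged = []
--     for s, e in intervals:
--         if not merged or s > merged[-1][1]:
--             merged.append([s, e])
--         else:
--             merged[-1][1] = max(merged[-1][1], e)
--     m = len(merged)
--     if m == 0:
--         return 0
--
--     res = m
--     for i in range(m):
--         lo, hi, best = i, m - 1, i
--         while lo <= hi: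
--             mid = (lo + hi) // 2
--             if merged[mid][0] - merged[i][1] <= k:
--                 best = mid
--                 lo = mid + 1
--             else:
--                 hi = mid - 1
--         reduction = best - i
--         res = min(res, m - reduction)
--     return res
-- ===== SOURCE B (Python) =====
-- from typing import List
--
-- def minConnectedGroups(intervals: List[List[int]], k: int) -> int:
--     intervals.sort()
--     merged = []
--     for s, e in intervals:
--         if merged and s <= merged[-1][1]:
--             if e > merged[-1][1]:
--                 merged[-1][1] = e
--         else:
--             merged.append([s, e])
--     m = len(merged)
--     res = m
--     j = 0
--     for i in range(m):
--         while j < m and merged[j][0] - merged[i][1] <= k: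
--             j += 1
--         res = min(res, m - (max(i, j - 1) - i))
--     return res
-- ===== Notes on version B (the rewrite author's own statement) =====
-- stated objective: alternative
-- what changed: After the shared sort-and-merge phase, A runs a binary search over the merged intervals for every row i (O(m log m) searches); B replaces all of them with a single forward two-pointer sweep whose pointer never moves backward (O(m) total), tracking the same running minimum.
import Mathlib
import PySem

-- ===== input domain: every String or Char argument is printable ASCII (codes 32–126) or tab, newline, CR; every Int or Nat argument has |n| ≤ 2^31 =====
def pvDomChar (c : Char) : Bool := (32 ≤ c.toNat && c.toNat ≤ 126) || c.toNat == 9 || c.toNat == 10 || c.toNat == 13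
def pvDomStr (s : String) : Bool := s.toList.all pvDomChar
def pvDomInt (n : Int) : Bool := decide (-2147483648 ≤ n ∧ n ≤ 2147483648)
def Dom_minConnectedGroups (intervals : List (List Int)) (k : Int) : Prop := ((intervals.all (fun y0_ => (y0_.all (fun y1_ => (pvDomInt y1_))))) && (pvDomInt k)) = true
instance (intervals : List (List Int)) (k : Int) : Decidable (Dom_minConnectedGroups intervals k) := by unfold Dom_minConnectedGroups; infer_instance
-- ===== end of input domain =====

-- B replaces A's per-interval binary search over the merged intervals by a single monotone
-- two-pointer sweep (objective: alternative).  Note: both Pythons sort `intervals` in place,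
-- so the argument mutation is identical; the theorems are about the return value.

-- ===== PORT A =====
-- 'for s, e in intervals' unpacks a length-2 list (Pre_): s = l[0], e = l[1]
def pvPair (l : List Int) : Int × Int := (PySem.List.pyGetD l 0 0, PySem.List.pyGetD l 1 0)

-- the body of A's merge loop: append [s, e], or mutate merged[-1][1] to max(merged[-1][1], e)
def pvMergeStepA (merged : List (Int × Int)) (se : Int × Int) : List (Int × Int) :=
  match merged.getLast? with
  | none => merged ++ [se]
  | some last =>
      if se.1 > last.2 then merged ++ [se]
      else merged.dropLast ++ [(last.1, max last.2 se.2)]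

-- A's inner 'while lo <= hi' binary search, literally
def pvBSearch (merged : List (Int × Int)) (ei k lo hi best : Int) : Int :=
  if _h : lo ≤ hi then
    let mid := PySem.Int.floordiv (lo + hi) 2
    if (PySem.List.pyGetD merged mid (0, 0)).1 - ei ≤ k then
      pvBSearch merged ei k (mid + 1) hi mid
    else
      pvBSearch merged ei k lo (mid - 1) best
  else best
termination_by (hi + 1 - lo).toNat
decreasing_by
  · have := PySem.Int.floordiv_two_mid_bounds _h; omega
  · have := PySem.Int.floordiv_two_mid_bounds _h; omega

def minConnectedGroups (intervals : List (List Int)) (k : Int) : Int :=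
  let ivs := PySem.List.sorted intervals (fun l => l) false
  let merged := ivs.foldl (fun acc l => pvMergeStepA acc (pvPair l)) []
  let m : Int := PySem.List.len merged
  if m = 0 then 0
  else
    (PySem.List.pyRange 0 m 1).foldl
      (fun res i =>
        let best := pvBSearch merged (PySem.List.pyGetD merged i (0, 0)).2 k i (m - 1) i
        min res (m - (best - i))) m

-- ===== PORT B =====
-- the body of B's merge loop (extend merged[-1][1] to e when it grows, else append)
def pvMergeStepB (merged : List (Int × Int)) (se : Int × Int) : List (Int × Int) :=
  match merged.getLast? with
  | some last =>
      if se.1 ≤ last.2 then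
        if se.2 > last.2 then merged.dropLast ++ [(last.1, se.2)] else merged
      else merged ++ [se]
  | none => merged ++ [se]

-- B's inner 'while j < m and merged[j][0] - merged[i][1] <= k: j += 1'
def pvAdvance (merged : List (Int × Int)) (m k ei j : Int) : Int :=
  if _h : j < m ∧ (PySem.List.pyGetD merged j (0, 0)).1 - ei ≤ k then
    pvAdvance merged m k ei (j + 1)
  else j
termination_by (m - j).toNat
decreasing_by omega

def minConnectedGroups_alt (intervals : List (List Int)) (k : Int) : Int :=
  let ivs := PySem.List.sorted intervals (fun l => l) false
  let merged := ivs.foldl (fun acc l => pvMergeStepB acc (pvPair l)) []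
  let m : Int := PySem.List.len merged
  ((PySem.List.pyRange 0 m 1).foldl
      (fun st i =>
        let j := pvAdvance merged m k (PySem.List.pyGetD merged i (0, 0)).2 st.2
        (min st.1 (m - (max i (j - 1) - i)), j)) (m, 0)).1

-- ===== PRECONDITION & SPEC =====
-- Pre_ excludes exactly the inputs where A raises: 'for s, e in intervals' raises ValueError
-- unless every inner list has exactly two elements.
def Pre_minConnectedGroups (intervals : List (List Int)) (k : Int) : Prop :=
  ∀ l ∈ intervals, l.length = 2
instance (intervals : List (List Int)) (k : Int) : Decidable (Pre_minConnectedGroups intervals k) := by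
  unfold Pre_minConnectedGroups; infer_instance

def pvWitness_minConnectedGroups : List (List Int) × Int := ([[1, 3], [6, 8], [0, 2]], 1)

def Spec_minConnectedGroups (intervals : List (List Int)) (k : Int) (out : Int) : Prop := out = minConnectedGroups_alt intervals k
instance (intervals : List (List Int)) (k : Int) (out : Int) : Decidable (Spec_minConnectedGroups intervals k out) := by unfold Spec_minConnectedGroups; infer_instance

-- ===== CLAIM (what is proved, stated in full; the proofs are below) =====
def Claim_equal_minConnectedGroups : Prop := ∀ (intervals : List (List Int)) (k : Int), Dom_minConnectedGroups intervals k → Pre_minConnectedGroups intervals k → Spec_minConnectedGroups intervals k (minConnectedGroups intervals k)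

-- ===== LEMMAS AND PROOFS =====

-- the two merge-loop bodies compute the same list
lemma pvMergeStep_eq (acc : List (Int × Int)) (se : Int × Int) :
    pvMergeStepB acc se = pvMergeStepA acc se := by
  unfold pvMergeStepA pvMergeStepB
  cases h : acc.getLast? with
  | none => rfl
  | some last =>
    by_cases h1 : se.1 > last.2
    · simp [h1]
    · have h1' : se.1 ≤ last.2 := by omega
      by_cases h2 : se.2 > last.2
      · simp [h1, h1', h2, max_eq_right (le_of_lt h2)]
      · have hmax : max last.2 se.2 = last.2 := by omega
        simp only [if_neg h1, if_pos h1', if_neg h2, hmax]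
        exact (List.dropLast_append_getLast? last h).symm

-- the count of leading merged intervals whose start is within reach of `ei + k`
def pvCount (k ei : Int) : List (Int × Int) → Nat
  | [] => 0
  | p :: rest => if p.1 - ei ≤ k then pvCount k ei rest + 1 else 0

lemma pvCount_le_length (k ei : Int) (l : List (Int × Int)) : pvCount k ei l ≤ l.length := by
  induction l with
  | nil => simp [pvCount]
  | cons p rest ih => simp only [pvCount, List.length_cons]; split <;> omega

-- on a list with nondecreasing starts, the reachability test is a prefix property
lemma pvCount_char (k ei : Int) (l : List (Int × Int))
    (hmono : (l.map Prod.fst).Pairwise (· ≤ ·)) (j : Nat) (hj : j < l.length) :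
    (l[j].1 - ei ≤ k) ↔ j < pvCount k ei l := by
  induction l generalizing j with
  | nil => simp at hj
  | cons p rest ih =>
    simp only [List.map_cons, List.pairwise_cons] at hmono
    obtain ⟨hhd, htl⟩ := hmono
    cases j with
    | zero =>
      simp only [List.getElem_cons_zero, pvCount]
      split <;> omega
    | succ j' =>
      have hj' : j' < rest.length := by simpa using hj
      simp only [List.getElem_cons_succ, pvCount]
      by_cases hp : p.1 - ei ≤ k
      · simp only [if_pos hp]
        rw [ih htl j' hj']
        omega
      · simp only [if_neg hp]
        have : p.1 ≤ rest[j'].1 := by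
          apply hhd
          exact List.mem_map_of_mem (List.getElem_mem hj')
        constructor
        · intro hc; omega
        · omega

-- `pvC merged k i` : the prefix-length bound for row i, as an Int
def pvC (merged : List (Int × Int)) (k i : Int) : Int :=
  (pvCount k (PySem.List.pyGetD merged i (0, 0)).2 merged : Int)

-- A's candidate value for row i, and A's running minimum after t rows
def pvCand (merged : List (Int × Int)) (k m i : Int) : Int :=
  m - (max i (pvC merged k i - 1) - i)

def pvResA (merged : List (Int × Int)) (k m t : Int) : Int :=
  (PySem.List.pyRange 0 t 1).foldl (fun res i => min res (pvCand merged k m i)) m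

lemma pvC_bounds (merged : List (Int × Int)) (k i : Int) :
    0 ≤ pvC merged k i ∧ pvC merged k i ≤ merged.length := by
  unfold pvC
  have := pvCount_le_length k (PySem.List.pyGetD merged i (0, 0)).2 merged
  omega

lemma pvC_char (merged : List (Int × Int)) (k : Int)
    (hmono : (merged.map Prod.fst).Pairwise (· ≤ ·)) (i j : Int)
    (hj0 : 0 ≤ j) (hjm : j < merged.length) :
    ((PySem.List.pyGetD merged j (0, 0)).1 - (PySem.List.pyGetD merged i (0, 0)).2 ≤ k
      ↔ j < pvC merged k i) := by
  rw [PySem.List.pyGetD_eq_getElem merged (0,0) hj0 hjm]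
  have hjn : j.toNat < merged.length := by omega
  rw [pvCount_char k _ merged hmono j.toNat hjn]
  unfold pvC
  omega

-- A's binary search returns max i (pvC - 1)
lemma pvBSearch_eq (merged : List (Int × Int)) (k : Int)
    (hmono : (merged.map Prod.fst).Pairwise (· ≤ ·)) (i : Int)
    (h0 : 0 ≤ i) (him : i < merged.length) :
    ∀ n : Nat, ∀ lo hi best : Int, (hi + 1 - lo).toNat ≤ n →
      i ≤ lo → hi ≤ (merged.length : Int) - 1 → pvC merged k i ≤ hi + 1 →
      (lo ≤ pvC merged k i ∨ lo = i) →
      ((lo = i ∧ best = i) ∨ (best = lo - 1 ∧ lo - 1 < pvC merged k i ∧ i ≤ lo - 1)) →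
      pvBSearch merged (PySem.List.pyGetD merged i (0, 0)).2 k lo hi best
        = max i (pvC merged k i - 1) := by
  have hcb := pvC_bounds merged k i
  intro n
  induction n with
  | zero =>
    intro lo hi best hn hlo hhi hch hlc hbest
    have hend : hi < lo := by omega
    rw [pvBSearch, dif_neg (by omega)]
    -- terminal analysis
    rcases hbest with ⟨hloi, hbi⟩ | ⟨hb, hbc, hib⟩
    · subst hloi hbi
      rcases hlc with hlc | _
      · -- c ≤ hi+1 ≤ lo = i and i ≤ c → c = i
        omega
      · -- lo = i, c ≤ hi + 1 ≤ lo = i... need max i (c-1) = i, i.e. c - 1 ≤ i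
        omega
    · -- best = lo - 1 = c - 1, i ≤ c - 1
      rcases hlc with hlc | hloi
      · omega
      · omega
  | succ n ih =>
    intro lo hi best hn hlo hhi hch hlc hbest
    by_cases hle : lo ≤ hi
    · rw [pvBSearch, dif_pos hle]
      have hmid := PySem.Int.floordiv_two_mid_bounds hle
      set mid := PySem.Int.floordiv (lo + hi) 2 with hmiddef
      have hmid0 : 0 ≤ mid := by omega
      have hmidm : mid < merged.length := by omega
      have hchar := pvC_char merged k hmono i mid hmid0 hmidm
      by_cases hP : (PySem.List.pyGetD merged mid (0, 0)).1 - (PySem.List.pyGetD merged i (0, 0)).2 ≤ k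
      · rw [if_pos hP]
        have hmc : mid < pvC merged k i := hchar.mp hP
        exact ih (mid + 1) hi mid (by omega) (by omega) hhi hch (Or.inl (by omega))
          (Or.inr ⟨by omega, by omega, by omega⟩)
      · rw [if_neg hP]
        have hmc : pvC merged k i ≤ mid := by
          by_contra hcon
          exact hP (hchar.mpr (by omega))
        exact ih lo (mid - 1) best (by omega) hlo (by omega) (by omega) hlc hbest
    · rw [pvBSearch, dif_neg hle]
      rcases hbest with ⟨hloi, hbi⟩ | ⟨hb, hbc, hib⟩
      · subst hloi hbi; rcases hlc with hlc | _ <;> omega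
      · rcases hlc with hlc | hloi <;> omega

-- B's inner while loop: bounds, all advanced indices reachable, stop condition
lemma pvAdvance_spec (merged : List (Int × Int)) (m k ei : Int) (hm : m = merged.length) :
    ∀ n : Nat, ∀ j : Int, (m - j).toNat ≤ n → 0 ≤ j → j ≤ m →
      j ≤ pvAdvance merged m k ei j ∧ pvAdvance merged m k ei j ≤ m ∧
      (∀ t : Int, j ≤ t → t < pvAdvance merged m k ei j →
        (PySem.List.pyGetD merged t (0, 0)).1 - ei ≤ k) ∧
      (pvAdvance merged m k ei j = m ∨
        ¬ (PySem.List.pyGetD merged (pvAdvance merged m k ei j) (0, 0)).1 - ei ≤ k) := by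
  intro n
  induction n with
  | zero =>
    intro j hn h0 hjm
    have hjm' : j = m := by omega
    rw [pvAdvance]
    have : ¬ (j < m ∧ (PySem.List.pyGetD merged j (0, 0)).1 - ei ≤ k) := by
      intro ⟨h1, _⟩; omega
    rw [dif_neg this]
    exact ⟨le_refl j, by omega, fun t h1 h2 => by omega, Or.inl hjm'⟩
  | succ n ih =>
    intro j hn h0 hjm
    rw [pvAdvance]
    by_cases hc : j < m ∧ (PySem.List.pyGetD merged j (0, 0)).1 - ei ≤ k
    · rw [dif_pos hc]
      obtain ⟨ih1, ih2, ih3, ih4⟩ := ih (j + 1) (by omega) (by omega) (by omega)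
      refine ⟨by omega, ih2, ?_, ih4⟩
      intro t h1 h2
      by_cases ht : t = j
      · subst ht; exact hc.2
      · exact ih3 t (by omega) h2
    · rw [dif_neg hc]
      refine ⟨le_refl j, hjm, fun t h1 h2 => by omega, ?_⟩
      by_cases hjm' : j = m
      · exact Or.inl hjm'
      · exact Or.inr (fun hP => hc ⟨by omega, hP⟩)

-- running-minimum facts about pvResA
lemma pvResA_zero (merged : List (Int × Int)) (k m : Int) : pvResA merged k m 0 = m := by
  unfold pvResA
  rw [PySem.List.pyRange_one_eq_nil (by omega)]
  rfl

lemma pvResA_succ (merged : List (Int × Int)) (k m : Int) (t : Int) (ht : 0 ≤ t) :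
    pvResA merged k m (t + 1) = min (pvResA merged k m t) (pvCand merged k m t) := by
  unfold pvResA
  rw [PySem.List.pyRange_one_succ_right ht, List.foldl_append]
  rfl

lemma pvResA_le (merged : List (Int × Int)) (k m : Int) :
    ∀ tn : Nat, pvResA merged k m tn ≤ m ∧
      ∀ i : Int, 0 ≤ i → i < tn → pvResA merged k m tn ≤ pvCand merged k m i := by
  intro tn
  induction tn with
  | zero => rw [Nat.cast_zero, pvResA_zero]; exact ⟨le_refl m, fun i h1 h2 => by omega⟩
  | succ t ih =>
    have hcast : ((t + 1 : Nat) : Int) = (t : Int) + 1 := by push_cast; ring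
    rw [hcast, pvResA_succ merged k m t (by positivity)]
    obtain ⟨ihm, ihc⟩ := ih
    refine ⟨by omega, ?_⟩
    intro i h1 h2
    by_cases hit : i < (t : Int)
    · have := ihc i h1 hit; omega
    · have : i = (t : Int) := by omega
      subst this; omega

-- the merged list produced by the merge loop has nondecreasing starts
lemma pvMerge_mono (ps : List (List Int)) (acc : List (Int × Int))
    (hps : ps.Pairwise (fun a b => (pvPair a).1 ≤ (pvPair b).1))
    (hacc : (acc.map Prod.fst).Pairwise (· ≤ ·))
    (hcross : ∀ x ∈ acc.map Prod.fst, ∀ r ∈ ps, x ≤ (pvPair r).1) :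
    ((ps.foldl (fun a l => pvMergeStepA a (pvPair l)) acc).map Prod.fst).Pairwise (· ≤ ·) := by
  induction ps generalizing acc with
  | nil => simpa using hacc
  | cons p rest ih =>
    rw [List.pairwise_cons] at hps
    obtain ⟨hp, hrest⟩ := hps
    rw [List.foldl_cons]
    apply ih _ hrest
    · -- pairwise of the new accumulator
      unfold pvMergeStepA
      cases h : acc.getLast? with
      | none =>
        have : acc = [] := List.getLast?_eq_none_iff.mp h
        subst this; simp
      | some last =>
        dsimp only
        by_cases h1 : (pvPair p).1 > last.2
        · rw [if_pos h1]
          rw [List.map_append, List.pairwise_append]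
          refine ⟨hacc, by simp, ?_⟩
          intro x hx y hy
          simp at hy
          subst hy
          exact hcross x hx p (List.mem_cons_self)
        · rw [if_neg h1]
          have heq : (acc.dropLast ++ [(last.1, max last.2 (pvPair p).2)]).map Prod.fst
              = acc.map Prod.fst := by
            conv_rhs => rw [← List.dropLast_append_getLast? last h]
            simp
          rw [heq]; exact hacc
    · -- cross property for the new accumulator
      unfold pvMergeStepA
      cases h : acc.getLast? with
      | none =>
        have hnil : acc = [] := List.getLast?_eq_none_iff.mp h
        subst hnil
        intro x hx r hr
        simp at hx
        subst hx
        exact hp r hr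
      | some last =>
        dsimp only
        intro x hx r hr
        by_cases h1 : (pvPair p).1 > last.2
        · rw [if_pos h1] at hx
          rw [List.map_append, List.mem_append] at hx
          rcases hx with hx | hx
          · exact hcross x hx r (List.mem_cons_of_mem _ hr)
          · simp at hx; subst hx; exact hp r hr
        · rw [if_neg h1] at hx
          have heq : (acc.dropLast ++ [(last.1, max last.2 (pvPair p).2)]).map Prod.fst
              = acc.map Prod.fst := by
            conv_rhs => rw [← List.dropLast_append_getLast? last h]
            simp
          rw [heq] at hx
          exact hcross x hx r (List.mem_cons_of_mem _ hr)

-- the per-row step of B: the two-pointer candidate leaves the running minimum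
-- exactly where A's binary-search candidate leaves it
lemma pvStep_core (merged : List (Int × Int)) (k m : Int) (hm : m = merged.length)
    (hmono : (merged.map Prod.fst).Pairwise (· ≤ ·)) (i : Int) (h0 : 0 ≤ i) (him : i < m)
    (j0 : Int) (hj0 : 0 ≤ j0) (hj0m : j0 ≤ m)
    (hI3 : j0 = 0 ∨ ∃ i', 0 ≤ i' ∧ i' < i ∧
      (PySem.List.pyGetD merged (j0 - 1) (0, 0)).1
        - (PySem.List.pyGetD merged i' (0, 0)).2 ≤ k) :
    (min (pvResA merged k m i)
        (m - (max i (pvAdvance merged m k (PySem.List.pyGetD merged i (0, 0)).2 j0 - 1) - i))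
      = pvResA merged k m (i + 1)) ∧
    (pvAdvance merged m k (PySem.List.pyGetD merged i (0, 0)).2 j0 = 0 ∨
      ∃ i'' : Int, 0 ≤ i'' ∧ i'' < i + 1 ∧
        (PySem.List.pyGetD merged
            (pvAdvance merged m k (PySem.List.pyGetD merged i (0, 0)).2 j0 - 1) (0, 0)).1
          - (PySem.List.pyGetD merged i'' (0, 0)).2 ≤ k) := by
  set ei := (PySem.List.pyGetD merged i (0, 0)).2 with hei
  set j' := pvAdvance merged m k ei j0 with hj'
  obtain ⟨ha1, ha2, ha3, ha4⟩ :=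
    pvAdvance_spec merged m k ei hm (m - j0).toNat j0 le_rfl hj0 hj0m
  rw [← hj'] at ha1 ha2 ha3 ha4
  have hcb := pvC_bounds merged k i
  have hres_le := pvResA_le merged k m i.toNat
  have hcast : ((i.toNat : Nat) : Int) = i := by omega
  rw [hcast] at hres_le
  obtain ⟨hresm, hrescand⟩ := hres_le
  rw [pvResA_succ merged k m i h0]
  constructor
  · -- the running minimum agrees
    by_cases hji : j' ≤ i
    · -- pointer at or below i : both candidates are m
      have hj'm : j' < m := by omega
      have hnP : ¬ (PySem.List.pyGetD merged j' (0, 0)).1 - ei ≤ k := by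
        rcases ha4 with h | h
        · omega
        · exact h
      have hcle : pvC merged k i ≤ j' := by
        by_contra hcon
        exact hnP ((pvC_char merged k hmono i j' (by omega) (by omega)).mpr (by omega))
      unfold pvCand
      omega
    · replace hji : i < j' := by omega
      have hcj : pvC merged k i ≤ j' := by
        rcases ha4 with h | h
        · omega
        · by_contra hcon
          exact h ((pvC_char merged k hmono i j' (by omega) (by omega)).mpr (by omega))
      by_cases hadv : j0 < j'
      · -- the pointer advanced at this step: last advanced index is reachable from i
        have hP : (PySem.List.pyGetD merged (j' - 1) (0, 0)).1 - ei ≤ k :=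
          ha3 (j' - 1) (by omega) (by omega)
        have : j' - 1 < pvC merged k i :=
          (pvC_char merged k hmono i (j' - 1) (by omega) (by omega)).mp hP
        unfold pvCand
        omega
      · -- no advance: an earlier row already reached j0 - 1; both minima stay at res
        have hjj : j' = j0 := by omega
        have hne : ¬ j0 = 0 := by omega
        rcases hI3 with h | ⟨i', hi'0, hi'i, hP'⟩
        · omega
        have hc' : j0 - 1 < pvC merged k i' :=
          (pvC_char merged k hmono i' (j0 - 1) (by omega) (by omega)).mp hP'
        have hcand' := hrescand i' hi'0 hi'i
        have hcb' := pvC_bounds merged k i'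
        unfold pvCand at hcand' ⊢
        omega
  · -- the pointer invariant
    by_cases hadv : j0 < j'
    · exact Or.inr ⟨i, h0, by omega, ha3 (j' - 1) (by omega) (by omega)⟩
    · have hjj : j' = j0 := by omega
      rcases hI3 with h | ⟨i', hi'0, hi'i, hP'⟩
      · exact Or.inl (by omega)
      · exact Or.inr ⟨i', hi'0, by omega, by rw [hjj]; exact hP'⟩

-- B's fold state after t rows
def pvStB (merged : List (Int × Int)) (k m t : Int) : Int × Int :=
  (PySem.List.pyRange 0 t 1).foldl
    (fun st i =>
      let j := pvAdvance merged m k (PySem.List.pyGetD merged i (0, 0)).2 st.2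
      (min st.1 (m - (max i (j - 1) - i)), j)) (m, 0)

-- B's fold invariant: first component tracks A's running minimum
lemma pvB_fold (merged : List (Int × Int)) (k m : Int) (hm : m = merged.length)
    (hmono : (merged.map Prod.fst).Pairwise (· ≤ ·)) :
    ∀ tn : Nat, tn ≤ merged.length →
      (pvStB merged k m tn).1 = pvResA merged k m tn ∧
      0 ≤ (pvStB merged k m tn).2 ∧ (pvStB merged k m tn).2 ≤ m ∧
      ((pvStB merged k m tn).2 = 0 ∨
        ∃ i' : Int, 0 ≤ i' ∧ i' < (tn : Int) ∧
          (PySem.List.pyGetD merged ((pvStB merged k m tn).2 - 1) (0, 0)).1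
            - (PySem.List.pyGetD merged i' (0, 0)).2 ≤ k) := by
  intro tn
  induction tn with
  | zero =>
    intro _
    have h0 : pvStB merged k m ((0 : Nat) : Int) = (m, 0) := by
      unfold pvStB
      rw [PySem.List.pyRange_one_eq_nil (by omega)]
      rfl
    have hr0 : pvResA merged k m ((0 : Nat) : Int) = m := by
      unfold pvResA
      rw [PySem.List.pyRange_one_eq_nil (by omega)]
      rfl
    rw [h0, hr0]
    exact ⟨rfl, le_refl 0, by omega, Or.inl (by omega)⟩
  | succ t ih =>
    intro htm
    obtain ⟨ih1, ih2, ih3, ih4⟩ := ih (by omega)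
    have hcast : ((t + 1 : Nat) : Int) = (t : Int) + 1 := by push_cast; ring
    have hsucc : pvStB merged k m ((t + 1 : Nat) : Int)
        = (let j := pvAdvance merged m k
              (PySem.List.pyGetD merged (t : Int) (0, 0)).2 (pvStB merged k m (t : Int)).2
           (min (pvStB merged k m (t : Int)).1
              (m - (max (t : Int) (j - 1) - (t : Int))), j)) := by
      unfold pvStB
      rw [hcast, PySem.List.pyRange_one_succ_right (by omega), List.foldl_append]
      rfl
    have hstep := pvStep_core merged k m hm hmono (t : Int) (by omega) (by omega)
      (pvStB merged k m (t : Int)).2 ih2 ih3 ih4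
    rw [hcast] at hsucc ⊢
    rw [hsucc]
    refine ⟨?_, ?_, ?_, ?_⟩
    · simp only []
      rw [ih1]
      exact hstep.1
    · simp only []
      exact (pvAdvance_spec merged m k _ hm _ _ le_rfl ih2 ih3).1.trans' ih2
    · simp only []
      exact (pvAdvance_spec merged m k _ hm _ _ le_rfl ih2 ih3).2.1
    · simp only []
      exact hstep.2

-- PySem.List.sorted elaborated with the core List order equals the same sort elaborated
-- with Mathlib's LinearOrder instances (the orders are definitionally equal; Decidable is a
-- subsingleton), letting the sorted_* order lemmas apply to the ports' sort
lemma pvSorted_inst (xs : List (List Int)) :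
    PySem.List.sorted xs (fun l => l) false
      = @PySem.List.sorted (List Int) (List Int) List.instLinearOrder.toLT
          (@LinearOrder.toDecidableLT _ List.instLinearOrder) xs (fun l => l) false := by
  unfold PySem.List.sorted
  simp only []
  congr 1
  funext acc x
  congr 1
  funext a b
  exact decide_eq_decide.mpr Iff.rfl

-- intervals.sort() orders length-2 lists by their first element
lemma pvHeadLe (a b : List Int) (ha : a.length = 2) (hb : b.length = 2) (h : a ≤ b) :
    (pvPair a).1 ≤ (pvPair b).1 := by
  match a, b with
  | [s1, e1], [s2, e2] =>
    simp only [pvPair, PySem.List.pyGetD_zero_cons]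
    rcases lt_or_eq_of_le h with h | h
    · rw [List.cons_lt_cons_iff] at h
      rcases h with h | ⟨h, _⟩ <;> simp_all <;> omega
    · simp_all

-- ===== VERDICT (by name: the statement is the Claim_ definition above) =====
theorem minConnectedGroups_spec : Claim_equal_minConnectedGroups := by
  intro intervals k _hdom hpre
  unfold Spec_minConnectedGroups minConnectedGroups minConnectedGroups_alt
  simp only []
  have hfold : (PySem.List.sorted intervals (fun l => l) false).foldl
      (fun acc l => pvMergeStepB acc (pvPair l)) []
      = (PySem.List.sorted intervals (fun l => l) false).foldl
      (fun acc l => pvMergeStepA acc (pvPair l)) [] :=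
    PySem.List.foldl_congr_mem _ _ _ _ (fun acc x _ => pvMergeStep_eq acc (pvPair x))
  rw [hfold]
  set ivs := PySem.List.sorted intervals (fun l => l) false with hivs
  set merged := ivs.foldl (fun acc l => pvMergeStepA acc (pvPair l)) [] with hmg
  have hps : ivs.Pairwise (fun a b => (pvPair a).1 ≤ (pvPair b).1) := by
    have hsp : ivs.Pairwise (fun a b => a ≤ b) := by
      rw [hivs, pvSorted_inst]
      exact PySem.List.sorted_pairwise intervals (fun l => l)
    refine hsp.imp_of_mem ?_
    intro a b hamem hbmem hab
    have hal : a.length = 2 := hpre a ((PySem.List.mem_sorted intervals _ false a).mp hamem)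
    have hbl : b.length = 2 := hpre b ((PySem.List.mem_sorted intervals _ false b).mp hbmem)
    exact pvHeadLe a b hal hbl hab
  have hmono : (merged.map Prod.fst).Pairwise (· ≤ ·) :=
    pvMerge_mono ivs [] hps (by simp) (by simp)
  set m : Int := PySem.List.len merged with hmdef
  have hm : m = merged.length := PySem.List.len_eq merged
  by_cases hm0 : m = 0
  · rw [if_pos hm0]
    show (0 : Int) = (pvStB merged k m m).1
    unfold pvStB
    rw [hm0, PySem.List.pyRange_one_eq_nil (by omega)]
    simp only [List.foldl_nil]
  · rw [if_neg hm0]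
    have hA : (PySem.List.pyRange 0 m 1).foldl
        (fun res i =>
          min res (m - (pvBSearch merged (PySem.List.pyGetD merged i (0, 0)).2 k i (m - 1) i - i)))
        m = pvResA merged k m m := by
      unfold pvResA
      apply PySem.List.foldl_congr_mem
      intro acc x hx
      obtain ⟨hx0, hxm⟩ := (PySem.List.mem_pyRange_one).mp hx
      have hcb := pvC_bounds merged k x
      have hb := pvBSearch_eq merged k hmono x hx0 (by omega)
        ((m - 1 + 1 - x).toNat) x (m - 1) x le_rfl le_rfl (by omega) (by omega)
        (Or.inr rfl) (Or.inl ⟨rfl, rfl⟩)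
      rw [hb]
      rfl
    rw [hA]
    show pvResA merged k m m = (pvStB merged k m m).1
    have hB := (pvB_fold merged k m hm hmono merged.length le_rfl).1
    have hcast : ((merged.length : Nat) : Int) = m := by omega
    rw [hcast] at hB
    exact hB.symm
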